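-- pv_equiv track=rewrite | github.com/jarosatori/rag-knowledge-base-bootcamp | tools/consolidate_taxonomy.py | rewrite_frontmatter_block
-- ===== SOURCE A (Python) =====
-- def rewrite_frontmatter_block(raw_block: str, new_category: str | None, new_sensitivity: str | None) -> str:
--     """
--     Rewrite the raw frontmatter text in-place, only touching 'category' and 'sensitivity'.
--     Preserves field order, comments, and YAML formatting elsewhere.
--     """
--     lines = raw_block.splitlines()
--     out_lines = []
--     cat_replaced = False
--     sens_replaced = False
--
--     for line in lines:
--         stripped = line.lstrip()
--         # Replace category line
--         if new_category and stripped.startswith("category:") and not cat_replaced: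
--             indent = line[: len(line) - len(stripped)]
--             out_lines.append(f'{indent}category: {new_category}')
--             cat_replaced = True
--             continue
--         # Replace sensitivity line
--         if new_sensitivity and stripped.startswith("sensitivity:") and not sens_replaced:
--             indent = line[: len(line) - len(stripped)]
--             out_lines.append(f'{indent}sensitivity: {new_sensitivity}')
--             sens_replaced = True
--             continue
--         out_lines.append(line)
--
--     return "\n".join(out_lines)
-- ===== SOURCE B (Python) =====
-- def _replace_first(lines, prefix, value):
--     """Return lines with the first line whose lstrip starts with prefix rewritten
--     (indent preserved) to '<indent><prefix> <value>'; unchanged if no line matches."""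
--     for i, line in enumerate(lines):
--         stripped = line.lstrip()
--         if stripped.startswith(prefix):
--             indent = line[: len(line) - len(stripped)]
--             return lines[:i] + [indent + prefix + " " + value] + lines[i + 1:]
--     return lines
--
--
-- def rewrite_frontmatter_block(raw_block: str, new_category: str | None, new_sensitivity: str | None) -> str:
--     lines = raw_block.splitlines()
--     if new_category:
--         lines = _replace_first(lines, "category:", new_category)
--     if new_sensitivity:
--         lines = _replace_first(lines, "sensitivity:", new_sensitivity)
--     return "\n".join(lines)
-- ===== Notes on version B (the rewrite author's own statement) =====
-- stated objective: simpler
-- what changed: A's single stateful pass with cat_replaced/sens_replaced flags is replaced by one generic first-match helper applied twice: first rewrite the first 'category:' line, then the first 'sensitivity:' line, each pass copying the rest unchanged.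
import Mathlib
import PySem

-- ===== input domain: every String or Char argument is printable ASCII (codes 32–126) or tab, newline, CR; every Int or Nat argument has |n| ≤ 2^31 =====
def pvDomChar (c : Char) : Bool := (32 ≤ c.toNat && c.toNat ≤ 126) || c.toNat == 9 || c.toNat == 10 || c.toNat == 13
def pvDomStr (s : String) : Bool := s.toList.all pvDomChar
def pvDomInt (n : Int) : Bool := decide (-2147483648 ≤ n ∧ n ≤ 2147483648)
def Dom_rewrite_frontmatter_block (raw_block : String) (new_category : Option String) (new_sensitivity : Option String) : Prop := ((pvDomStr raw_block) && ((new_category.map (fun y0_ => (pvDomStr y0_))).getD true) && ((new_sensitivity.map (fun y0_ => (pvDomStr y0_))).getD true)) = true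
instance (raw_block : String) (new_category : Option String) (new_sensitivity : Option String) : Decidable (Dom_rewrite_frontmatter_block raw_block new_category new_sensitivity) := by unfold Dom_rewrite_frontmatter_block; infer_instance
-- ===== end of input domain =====

-- B replaces A's single stateful two-flag pass by two independent single-purpose
-- first-match rewrites (one per field); objective: simpler decomposition, same cost.

-- ===== PORT A =====

-- Python truthiness of a `str | None` value (`if new_category:`): None and "" are falsy.
def pvTruthy (o : Option String) : Bool :=
  match o with
  | none => false
  | some s => !(s.toList == [])

-- the `for line in lines:` loop of A, carrying the cat_replaced/sens_replaced flags;
-- `line[: len(line) - len(stripped)]` is `take` (the stop index is ≥ 0 and ≤ len(line)).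
def pvLoopA (nc ns : Option String) : List (List Char) → Bool → Bool → List (List Char)
  | [], _, _ => []
  | line :: rest, catR, sensR =>
    let stripped := PySem.Chars.lstrip line
    if pvTruthy nc && PySem.Chars.startswith stripped "category:".toList && !catR then
      (line.take (line.length - stripped.length) ++ "category: ".toList ++ (nc.getD "").toList)
        :: pvLoopA nc ns rest true sensR
    else if pvTruthy ns && PySem.Chars.startswith stripped "sensitivity:".toList && !sensR then
      (line.take (line.length - stripped.length) ++ "sensitivity: ".toList ++ (ns.getD "").toList)
        :: pvLoopA nc ns rest catR true
    else
      line :: pvLoopA nc ns rest catR sensR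

def rewrite_frontmatter_block (raw_block : String) (new_category : Option String) (new_sensitivity : Option String) : String :=
  String.ofList (PySem.Chars.join "\n".toList
    (pvLoopA new_category new_sensitivity (PySem.Chars.splitlines raw_block.toList) false false))

-- ===== PORT B =====

-- _replace_first: rewrite the first line whose lstrip starts with `pre` (indent kept).
def pvReplaceFirst (pre val : List Char) : List (List Char) → List (List Char)
  | [] => []
  | line :: rest =>
    let stripped := PySem.Chars.lstrip line
    if PySem.Chars.startswith stripped pre then
      (line.take (line.length - stripped.length) ++ pre ++ " ".toList ++ val) :: rest
    else
      line :: pvReplaceFirst pre val rest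

def rewrite_frontmatter_block_alt (raw_block : String) (new_category : Option String) (new_sensitivity : Option String) : String :=
  let lines0 := PySem.Chars.splitlines raw_block.toList
  let lines1 := if pvTruthy new_category then
      pvReplaceFirst "category:".toList ((new_category.getD "").toList) lines0 else lines0
  let lines2 := if pvTruthy new_sensitivity then
      pvReplaceFirst "sensitivity:".toList ((new_sensitivity.getD "").toList) lines1 else lines1
  String.ofList (PySem.Chars.join "\n".toList lines2)

-- ===== PRECONDITION & SPEC =====
def Spec_rewrite_frontmatter_block (raw_block : String) (new_category : Option String) (new_sensitivity : Option String) (out : String) : Prop := out = rewrite_frontmatter_block_alt raw_block new_category new_sensitivity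
instance (raw_block : String) (new_category : Option String) (new_sensitivity : Option String) (out : String) : Decidable (Spec_rewrite_frontmatter_block raw_block new_category new_sensitivity out) := by unfold Spec_rewrite_frontmatter_block; infer_instance

-- ===== CLAIM (what is proved, stated in full; the proofs are below) =====
def Claim_equal_rewrite_frontmatter_block : Prop := ∀ (raw_block : String) (new_category : Option String) (new_sensitivity : Option String), Dom_rewrite_frontmatter_block raw_block new_category new_sensitivity → Spec_rewrite_frontmatter_block raw_block new_category new_sensitivity (rewrite_frontmatter_block raw_block new_category new_sensitivity)

-- ===== LEMMAS AND PROOFS =====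

-- the indent slice is exactly the leading whitespace, so after it the lstrip of the
-- rewritten line starts at the (non-space) first character of the prefix
lemma lstrip_indent_append (line : List Char) (c : Char) (tail : List Char)
    (hc : PySem.Chars.isspace c = false) :
    PySem.Chars.lstrip (line.take (line.length - (PySem.Chars.lstrip line).length) ++ (c :: tail))
      = c :: tail := by
  have hsplit := List.takeWhile_append_dropWhile (p := PySem.Chars.isspace) (l := line)
  have hadd : (line.takeWhile PySem.Chars.isspace).length
      + (line.dropWhile PySem.Chars.isspace).length = line.length := by
    rw [← List.length_append, hsplit]
  have hlen : line.length - (PySem.Chars.lstrip line).length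
      = (line.takeWhile PySem.Chars.isspace).length := by
    simp [PySem.Chars.lstrip]
    omega
  rw [hlen]
  have htake : List.take ((line.takeWhile PySem.Chars.isspace).length) line
      = line.takeWhile PySem.Chars.isspace := by
    calc List.take ((line.takeWhile PySem.Chars.isspace).length) line
        = List.take ((line.takeWhile PySem.Chars.isspace).length)
            (line.takeWhile PySem.Chars.isspace ++ line.dropWhile PySem.Chars.isspace) := by
          rw [hsplit]
      _ = line.takeWhile PySem.Chars.isspace := List.take_left
  rw [htake]
  have hnil : List.dropWhile PySem.Chars.isspace (line.takeWhile PySem.Chars.isspace) = [] := by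
    rw [List.dropWhile_eq_nil_iff]
    intro x hx
    exact List.mem_takeWhile_imp hx
  simp [PySem.Chars.lstrip, List.dropWhile_append, hnil, hc]

lemma sw_cat_not_sens (t : List Char) :
    PySem.Chars.startswith ('c' :: t) ['s', 'e', 'n', 's', 'i', 't', 'i', 'v', 'i', 't', 'y', ':'] = false := rfl

lemma loopA_tt (nc ns : Option String) (ls : List (List Char)) :
    pvLoopA nc ns ls true true = ls := by
  induction ls with
  | nil => rfl
  | cons line rest ih => simp [pvLoopA, ih]

lemma loopA_tf (nc ns : Option String) (ls : List (List Char)) :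
    pvLoopA nc ns ls true false
      = (if pvTruthy ns then
          pvReplaceFirst "sensitivity:".toList ((ns.getD "").toList) ls else ls) := by
  induction ls with
  | nil => simp [pvLoopA, pvReplaceFirst]
  | cons line rest ih =>
    by_cases hns : pvTruthy ns
    · by_cases hsw : PySem.Chars.startswith (PySem.Chars.lstrip line) ['s', 'e', 'n', 's', 'i', 't', 'i', 'v', 'i', 't', 'y', ':']
      · simp [pvLoopA, pvReplaceFirst, hns, hsw, loopA_tt]
      · simp [pvLoopA, pvReplaceFirst, hns, hsw, ih]
    · simp [pvLoopA, hns, ih]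

lemma loopA_ft (nc ns : Option String) (ls : List (List Char)) :
    pvLoopA nc ns ls false true
      = (if pvTruthy nc then
          pvReplaceFirst "category:".toList ((nc.getD "").toList) ls else ls) := by
  induction ls with
  | nil => simp [pvLoopA, pvReplaceFirst]
  | cons line rest ih =>
    by_cases hnc : pvTruthy nc
    · by_cases hsw : PySem.Chars.startswith (PySem.Chars.lstrip line) ['c', 'a', 't', 'e', 'g', 'o', 'r', 'y', ':']
      · simp [pvLoopA, pvReplaceFirst, hnc, hsw, loopA_tt]
      · simp [pvLoopA, pvReplaceFirst, hnc, hsw, ih]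
    · simp [pvLoopA, hnc, ih]

lemma loopA_ff (nc ns : Option String) (ls : List (List Char)) :
    pvLoopA nc ns ls false false
      = (if pvTruthy ns then
          pvReplaceFirst "sensitivity:".toList ((ns.getD "").toList)
            (if pvTruthy nc then
              pvReplaceFirst "category:".toList ((nc.getD "").toList) ls else ls)
         else
          (if pvTruthy nc then
            pvReplaceFirst "category:".toList ((nc.getD "").toList) ls else ls)) := by
  induction ls with
  | nil => simp [pvLoopA, pvReplaceFirst]
  | cons line rest ih =>
    by_cases hnc : pvTruthy nc
    · by_cases hc : PySem.Chars.startswith (PySem.Chars.lstrip line) ['c', 'a', 't', 'e', 'g', 'o', 'r', 'y', ':']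
      · -- A rewrites the category line; B's first pass rewrites it and the second pass skips it
        have hskip := lstrip_indent_append line 'c'
          ('a' :: 't' :: 'e' :: 'g' :: 'o' :: 'r' :: 'y' :: ':' :: ' ' :: (nc.getD "").toList) (by rfl)
        by_cases hns : pvTruthy ns
        · simp [pvLoopA, pvReplaceFirst, hnc, hc, hns, loopA_tf, hskip, sw_cat_not_sens]
        · simp [pvLoopA, pvReplaceFirst, hnc, hc, hns, loopA_tf]
      · by_cases hns : pvTruthy ns
        · by_cases hs : PySem.Chars.startswith (PySem.Chars.lstrip line) ['s', 'e', 'n', 's', 'i', 't', 'i', 'v', 'i', 't', 'y', ':']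
          · simp [pvLoopA, pvReplaceFirst, hnc, hc, hns, hs, loopA_ft]
          · simp [pvLoopA, pvReplaceFirst, hnc, hc, hns, hs, ih]
        · simp [pvLoopA, pvReplaceFirst, hnc, hc, hns, ih]
    · by_cases hns : pvTruthy ns
      · by_cases hs : PySem.Chars.startswith (PySem.Chars.lstrip line) ['s', 'e', 'n', 's', 'i', 't', 'i', 'v', 'i', 't', 'y', ':']
        · simp [pvLoopA, pvReplaceFirst, hnc, hns, hs, loopA_ft]
        · simp [pvLoopA, pvReplaceFirst, hnc, hns, hs, ih]
      · simp [pvLoopA, hnc, hns, ih]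

-- ===== VERDICT (by name: the statement is the Claim_ definition above) =====
theorem rewrite_frontmatter_block_spec : Claim_equal_rewrite_frontmatter_block := by
  intro raw nc ns _
  unfold Spec_rewrite_frontmatter_block rewrite_frontmatter_block rewrite_frontmatter_block_alt
  rw [loopA_ff]
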